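-- pv_equiv track=rewrite | github.com/AquaregiaAnubhav/Linkedin-Queens-Solver | queens.py | inv_board_chk
-- ===== SOURCE A (Python) =====
-- def inv_board_chk(board):
--     """
--     Returns True if the board is in a non-valid state:
--       - Any row has no 'eligible' or 'queen' cells (all ineligible).
--       - Any column has no 'eligible' or 'queen' cells.
--       - Any color region has no 'eligible' or 'queen' cells (all ineligible and no queen placed).
--     """
--     n=len(board)
--     # Check rows
--     for i in range(n):
--         if all(cell["state"]=="ineligible" for cell in board[i]):
--             return True
--
--     #check columns
--     for j in range(n):
--         if all(board[i][j]["state"]=="ineligible" for i in range(n)):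
--             return True
--
--     #check color regions
--     region_cells={}
--     for i in range(n):
--         for j in range(n):
--             color=board[i][j]["Color"]
--             region_cells.setdefault(color,[]).append((i, j))
--
--     for color, coords in region_cells.items():
--         #skip regions with a queen
--         if any(board[r][c]["state"]=="queen" for r,c in coords):
--             continue
--         #if all are ineligible (and no queen), invalid
--         if all(board[r][c]["state"]=="ineligible" for r,c in coords):
--             return True
--
--     return False
-- ===== SOURCE B (Python) =====
-- def inv_board_chk(board):
--     """One pass over the cells, row by row: per row, track whether any non-'ineligible'
--     cell was seen (if none, the board is invalid right away, like the original's row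
--     scan); across rows, track per-column and per-color whether any non-'ineligible'
--     cell was seen; the board is invalid iff a tracker stayed empty. (A color region
--     with a queen always has a non-ineligible cell, so the original's separate queen
--     check is subsumed.)"""
--     n = len(board)
--     col_ok = [False] * n
--     color_ok = {}
--     for row in board:
--         row_ok = False
--         for j, cell in enumerate(row):
--             ok = cell["state"] != "ineligible"
--             color = cell["Color"]
--             color_ok[color] = color_ok.get(color, False) or ok
--             if ok:
--                 row_ok = True
--                 col_ok[j] = True
--         if not row_ok:
--             return True
--     return (not all(col_ok)) or (not all(color_ok.values()))
-- ===== Notes on version B (the rewrite author's own statement) =====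
-- stated objective: faster
-- what changed: Replaces A's three separate passes (per-row all-scan, per-column all-scan, and a grouping dict whose color lists are re-scanned twice, with a redundant queen check) by one row-by-row pass that keeps per-column/per-color 'seen a non-ineligible cell' trackers, returns True as soon as a row shows none, and answers from the trackers at the end.
-- outside the precondition, e.g. on inv_board_chk([[{'state': 'ineligible'}]]): A returns True, B raises KeyError
import Mathlib
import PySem

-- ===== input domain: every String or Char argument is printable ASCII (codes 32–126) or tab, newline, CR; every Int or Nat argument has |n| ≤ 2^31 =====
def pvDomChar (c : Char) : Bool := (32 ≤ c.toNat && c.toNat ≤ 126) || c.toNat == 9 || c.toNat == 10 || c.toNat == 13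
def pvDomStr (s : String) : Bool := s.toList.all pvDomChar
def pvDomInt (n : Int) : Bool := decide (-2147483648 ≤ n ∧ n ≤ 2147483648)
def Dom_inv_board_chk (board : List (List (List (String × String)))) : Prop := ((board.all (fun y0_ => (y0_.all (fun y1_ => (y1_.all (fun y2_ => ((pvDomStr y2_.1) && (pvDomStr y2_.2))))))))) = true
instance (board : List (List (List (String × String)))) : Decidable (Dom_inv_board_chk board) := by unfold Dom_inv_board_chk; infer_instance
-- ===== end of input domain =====

-- B replaces A's three separate passes (row scan, column scan, color-grouping dict with
-- a redundant queen check) by one row-by-row pass keeping per-column / per-color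
-- "seen a non-ineligible cell" trackers, returning True as soon as a row has none;
-- equivalence is proved on the boards admitted by Pre_inv_board_chk below.


-- ===== PORT A =====
-- cell["state"] / cell["Color"]: Pre_ guarantees the key is present (a missing key is
-- Python's KeyError, excluded by Pre_), so the defaulted lookup is exact on Pre_.
def pvCellState (cell : List (String × String)) : String :=
  PySem.Dict.getD ⟨cell⟩ "state" ""

def pvCellColor (cell : List (String × String)) : String :=
  PySem.Dict.getD ⟨cell⟩ "Color" ""

-- board[i][j]; Pre_ keeps every index in range, so the defaulted get is exact on Pre_.
def pvAt (board : List (List (List (String × String)))) (i j : Int) : List (String × String) :=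
  PySem.List.pyGetD (PySem.List.pyGetD board i []) j []

def inv_board_chk (board : List (List (List (String × String)))) : Bool :=
  let n : Int := (board.length : Int)
  -- check rows
  if (PySem.List.pyRange 0 n).any (fun i =>
      (PySem.List.pyGetD board i []).all (fun cell => pvCellState cell == "ineligible")) then
    true
  -- check columns
  else if (PySem.List.pyRange 0 n).any (fun j =>
      (PySem.List.pyRange 0 n).all (fun i => pvCellState (pvAt board i j) == "ineligible")) then
    true
  else
    -- region_cells.setdefault(color, []).append((i, j))  ==  modify color [] (· ++ [(i, j)])
    let region_cells : PySem.Dict String (List (Int × Int)) :=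
      (PySem.List.pyRange 0 n).foldl (fun d i =>
        (PySem.List.pyRange 0 n).foldl (fun d j =>
          PySem.Dict.modify d (pvCellColor (pvAt board i j)) [] (fun l => l ++ [(i, j)])) d) ⟨[]⟩
    -- for color, coords: skip if any queen; return True if all ineligible
    region_cells.items.any (fun kv =>
      !(kv.2.any (fun rc => pvCellState (pvAt board rc.1 rc.2) == "queen")) &&
      kv.2.all (fun rc => pvCellState (pvAt board rc.1 rc.2) == "ineligible"))

-- ===== PORT B =====
def pvAltRowStep (s : Bool × List Bool × PySem.Dict String Bool)
    (jc : Int × List (String × String)) : Bool × List Bool × PySem.Dict String Bool :=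
  -- one cell: (row_ok, col_ok, color_ok) update; col_ok[j] = True is .set jc.1.toNat
  -- (j from enumerate is ≥ 0; Python's IndexError for j ≥ len(col_ok) is outside Pre_)
  (s.1 || (pvCellState jc.2 != "ineligible"),
   (if (pvCellState jc.2 != "ineligible") then s.2.1.set jc.1.toNat true else s.2.1),
   s.2.2.insert (pvCellColor jc.2)
     (s.2.2.getD (pvCellColor jc.2) false || (pvCellState jc.2 != "ineligible")))

def pvAltLoop : List (List (List (String × String))) → List Bool → PySem.Dict String Bool → Bool
  | [], colOk, colorOk => !colOk.all id || !(colorOk.values.all id)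
  | row :: rest, colOk, colorOk =>
    -- for j, cell in enumerate(row): … ; if not row_ok: return True
    let s := (PySem.List.enumerate row).foldl pvAltRowStep (false, colOk, colorOk)
    if !s.1 then true else pvAltLoop rest s.2.1 s.2.2

def inv_board_chk_alt (board : List (List (List (String × String)))) : Bool :=
  pvAltLoop board (List.replicate board.length false) ⟨[]⟩

-- ===== PRECONDITION & SPEC =====
def pvHasKeys (cell : List (String × String)) : Prop :=
  PySem.Dict.contains (⟨cell⟩ : PySem.Dict String String) "state" = true ∧
  PySem.Dict.contains (⟨cell⟩ : PySem.Dict String String) "Color" = true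

def pvSquarePre (board : List (List (List (String × String)))) : Prop :=
  ∀ row ∈ board, row.length = board.length ∧ ∀ cell ∈ row, pvHasKeys cell

def pvBadRow (row : List (List (String × String))) : Prop :=
  ∀ cell ∈ row,
    PySem.Dict.get? (⟨cell⟩ : PySem.Dict String String) "state" = some "ineligible" ∧
    PySem.Dict.contains (⟨cell⟩ : PySem.Dict String String) "Color" = true

def pvGoodRow (row : List (List (String × String))) (n : Nat) : Prop :=
  row.length ≤ n ∧ (∀ cell ∈ row, pvHasKeys cell) ∧
  ∃ cell ∈ row, PySem.Dict.get? (⟨cell⟩ : PySem.Dict String String) "state" ≠ some "ineligible"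

-- Pre_ admits (a) square boards whose cells all carry the "state" and "Color" keys, and
-- (b) boards whose row scan hits an all-'ineligible' (possibly empty) row after rows that
-- are fully readable: there both programs return True.  It excludes other boards: there A
-- raises IndexError/KeyError on ordinary inputs, and its occasional early True (a row
-- check that short-circuits before the error, or rows longer than n whose extra cells
-- only A's row scan reads) is an accident of A's pass order; B raises or answers from the
-- cells it read there.
def Pre_inv_board_chk (board : List (List (List (String × String)))) : Prop :=
  pvSquarePre board ∨
  ∃ i < board.length, pvBadRow (board.getD i []) ∧
    ∀ m < i, pvGoodRow (board.getD m []) board.length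

instance (board : List (List (List (String × String)))) : Decidable (Pre_inv_board_chk board) := by
  unfold Pre_inv_board_chk pvSquarePre pvBadRow pvGoodRow pvHasKeys; infer_instance

def pvWitness_inv_board_chk : (List (List (List (String × String)))) :=
  [[[("state", "eligible"), ("Color", "A")], [("state", "ineligible"), ("Color", "B")]],
   [[("state", "queen"), ("Color", "B")], [("state", "eligible"), ("Color", "A")]]]

def Spec_inv_board_chk (board : List (List (List (String × String)))) (out : Bool) : Prop := out = inv_board_chk_alt board
instance (board : List (List (List (String × String)))) (out : Bool) : Decidable (Spec_inv_board_chk board out) := by unfold Spec_inv_board_chk; infer_instance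

-- ===== CLAIM (what is proved, stated in full; the proofs are below) =====
def Claim_equal_inv_board_chk : Prop := ∀ (board : List (List (List (String × String)))), Dom_inv_board_chk board → Pre_inv_board_chk board → Spec_inv_board_chk board (inv_board_chk board)

-- ===== LEMMAS AND PROOFS =====

def pvCellN (board : List (List (List (String × String)))) (p : Nat × Nat) : List (String × String) :=
  pvAt board (p.1 : Int) (p.2 : Int)

def pvNP (n : Nat) : List (Nat × Nat) :=
  (List.range n).flatMap (fun i => (List.range n).map (fun j => (i, j)))

def pvKey (board : List (List (List (String × String)))) (p : Nat × Nat) : String :=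
  pvCellColor (pvCellN board p)

def pvOk (board : List (List (List (String × String)))) (p : Nat × Nat) : Bool :=
  pvCellState (pvCellN board p) != "ineligible"

def pvColFold (board : List (List (List (String × String)))) : List Bool :=
  (pvNP board.length).foldl (fun r p => if pvOk board p then r.set p.2 true else r)
    (List.replicate board.length false)

def pvColorFold (board : List (List (List (String × String)))) : PySem.Dict String Bool :=
  (pvNP board.length).foldl
    (fun d p => d.insert (pvKey board p) (d.getD (pvKey board p) false || pvOk board p)) ⟨[]⟩

theorem foldl_nested_pyRange {σ : Type} (n : Nat) (F : σ → Int → Int → σ) (s : σ) :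
    (PySem.List.pyRange 0 (n : Int)).foldl
      (fun a i => (PySem.List.pyRange 0 (n : Int)).foldl (fun a' j => F a' i j) a) s
    = (pvNP n).foldl (fun a p => F a (p.1 : Int) (p.2 : Int)) s := by
  simp only [PySem.List.pyRange_zero_natCast, List.foldl_map, pvNP, List.foldl_flatMap]

theorem set_fold_spec (board : List (List (List (String × String)))) (sel : Nat × Nat → Nat) :
    ∀ (L : List (Nat × Nat)) (r : List Bool), (∀ p ∈ L, sel p < r.length) →
      ((L.foldl (fun r p => if pvOk board p then r.set (sel p) true else r) r).length = r.length ∧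
       ∀ t : Nat,
        (L.foldl (fun r p => if pvOk board p then r.set (sel p) true else r) r).getD t false
          = (r.getD t false || L.any (fun p => sel p == t && pvOk board p))) := by
  intro L
  induction L with
  | nil => intro r _; simp
  | cons x L ih =>
    intro r hr
    by_cases hx : pvOk board x
    · have hlt : sel x < r.length := hr x (by simp)
      have hset : ∀ t : Nat, (r.set (sel x) true).getD t false = ((sel x == t) || r.getD t false) := by
        intro t
        by_cases ht : sel x = t
        · subst ht
          simp [List.getD_eq_getElem?_getD, List.getElem?_set, hlt]
        · simp [List.getD_eq_getElem?_getD, List.getElem?_set, ht, Ne.symm ht]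
      have hr' : ∀ p ∈ L, sel p < (r.set (sel x) true).length := by
        intro p hp; simpa using hr p (by simp [hp])
      obtain ⟨hlen, hgd⟩ := ih (r.set (sel x) true) hr'
      constructor
      · simpa [hx] using hlen.trans (by simp)
      · intro t
        simp only [List.foldl_cons, hx, if_pos, List.any_cons]
        rw [hgd t, hset t]
        cases h1 : (sel x == t) <;> cases r.getD t false <;> simp [hx]
    · obtain ⟨hlen, hgd⟩ := ih r (fun p hp => hr p (by simp [hp]))
      constructor
      · simpa [hx] using hlen
      · intro t
        simp only [List.foldl_cons, List.any_cons, hx, Bool.false_eq_true, if_false]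
        rw [hgd t]
        simp

theorem getD_insert_or_fold (board : List (List (List (String × String)))) :
    ∀ (L : List (Nat × Nat)) (d : PySem.Dict String Bool) (c : String),
      (L.foldl (fun d p => d.insert (pvKey board p) (d.getD (pvKey board p) false || pvOk board p)) d).getD c false
        = (d.getD c false || L.any (fun p => pvKey board p == c && pvOk board p)) := by
  intro L
  induction L with
  | nil => intro d c; simp
  | cons x L ih =>
    intro d c
    simp only [List.foldl_cons, List.any_cons]
    rw [ih]
    by_cases hc : c = pvKey board x
    · subst hc
      simp [PySem.Dict.getD_insert, Bool.or_assoc]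
    · have hb : (pvKey board x == c) = false := beq_eq_false_iff_ne.mpr (Ne.symm hc)
      simp [PySem.Dict.getD_insert, hc, hb]

theorem all_id_false_iff (l : List Bool) :
    (l.all id = false) ↔ ∃ t, t < l.length ∧ l.getD t false = false := by
  rw [show (l.all id = false) ↔ ¬ (l.all id = true) by simp]
  rw [List.all_eq_true]
  push_neg
  constructor
  · rintro ⟨x, hx, hxf⟩
    obtain ⟨i, hi, rfl⟩ := List.mem_iff_getElem.mp hx
    exact ⟨i, hi, by simp_all [List.getD_eq_getElem l false hi]⟩
  · rintro ⟨t, ht, hf⟩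
    exact ⟨l[t], List.getElem_mem ht, by simp_all [List.getD_eq_getElem l false ht]⟩

def pvInelig (board : List (List (List (String × String)))) (p : Nat × Nat) : Prop :=
  pvCellState (pvCellN board p) = "ineligible"

theorem mem_pvNP (n : Nat) (p : Nat × Nat) : p ∈ pvNP n ↔ p.1 < n ∧ p.2 < n := by
  cases p with
  | mk a b => simp [pvNP]

theorem not_ok_iff (board : List (List (List (String × String)))) (p : Nat × Nat) :
    pvOk board p = false ↔ pvInelig board p := by
  simp [pvOk, pvInelig]

theorem colFold_false_iff (board : List (List (List (String × String)))) :
    ((pvColFold board).all id = false) ↔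
      ∃ j < board.length, ∀ i < board.length, pvInelig board (i, j) := by
  obtain ⟨hlen, hgd⟩ := set_fold_spec board Prod.snd (pvNP board.length)
    (List.replicate board.length false)
    (by intro p hp; simpa using ((mem_pvNP board.length p).mp hp).2)
  have hrep : ∀ t : Nat, (List.replicate board.length false).getD t false = false := by
    intro t
    rw [List.getD_eq_getElem?_getD, List.getElem?_replicate]
    split <;> rfl
  rw [all_id_false_iff]
  unfold pvColFold
  rw [hlen]
  simp only [List.length_replicate]
  constructor
  · rintro ⟨t, ht, hf⟩
    rw [hgd t, hrep t] at hf
    simp only [Bool.false_or, List.any_eq_false] at hf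
    refine ⟨t, ht, fun i hi => ?_⟩
    have := hf (i, t) ((mem_pvNP board.length (i, t)).mpr ⟨hi, ht⟩)
    simp only [beq_self_eq_true, Bool.true_and] at this
    exact (not_ok_iff board (i, t)).mp (by simpa using this)
  · rintro ⟨j, hj, hall⟩
    refine ⟨j, hj, ?_⟩
    rw [hgd j, hrep j]
    simp only [Bool.false_or, List.any_eq_false]
    intro p hp
    obtain ⟨h1, h2⟩ := (mem_pvNP board.length p).mp hp
    by_cases hpj : p.2 = j
    · have := (not_ok_iff board p).mpr (by
        have := hall p.1 h1
        rwa [show (p.1, (j : Nat)) = p by rw [← hpj]] at this)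
      simp [this]
    · simp [beq_eq_false_iff_ne.mpr hpj]

theorem colorFold_false_iff (board : List (List (List (String × String)))) :
    ((pvColorFold board).values.all id = false) ↔
      ∃ p ∈ pvNP board.length, ∀ q ∈ pvNP board.length,
        pvKey board q = pvKey board p → pvInelig board q := by
  have hnodup : (pvColorFold board).keys.Nodup := by
    unfold pvColorFold
    exact PySem.Dict.nodup_keys_foldl_insert_key _ (pvKey board) _ _ (by simp)
  have hkeys : (pvColorFold board).keys
      = PySem.Set.ofList ((pvNP board.length).map (pvKey board)) := by
    unfold pvColorFold
    rw [PySem.Dict.keys_foldl_insert_key]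
    rfl
  have hget : ∀ c, (pvColorFold board).getD c false
      = (pvNP board.length).any (fun p => pvKey board p == c && pvOk board p) := by
    intro c
    unfold pvColorFold
    rw [getD_insert_or_fold]
    rw [show ({ items := [] } : PySem.Dict String Bool).getD c false = false from rfl]
    simp
  rw [PySem.Dict.values_eq_map_keys (pvColorFold board) hnodup false]
  rw [show ((pvColorFold board).keys.map (fun k => (pvColorFold board).getD k false)).all id
        = (pvColorFold board).keys.all (fun k => (pvColorFold board).getD k false) by
      rw [List.all_map]; rfl]
  rw [show ((pvColorFold board).keys.all fun k => (pvColorFold board).getD k false) = false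
        ↔ ¬ (((pvColorFold board).keys.all fun k => (pvColorFold board).getD k false) = true) by simp]
  rw [List.all_eq_true]
  push_neg
  constructor
  · rintro ⟨c, hc, hcf⟩
    rw [hkeys] at hc
    obtain ⟨p, hp, rfl⟩ := List.mem_map.mp ((PySem.Set.mem_ofList _ _).mp hc)
    refine ⟨p, hp, fun q hq hkey => ?_⟩
    have hany := (Bool.not_eq_true _).mp hcf
    rw [hget] at hany
    have := List.any_eq_false.mp hany q hq
    rw [hkey] at this
    simp only [beq_self_eq_true, Bool.true_and] at this
    exact (not_ok_iff board q).mp (by simpa using this)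
  · rintro ⟨p, hp, hall⟩
    refine ⟨pvKey board p, ?_, ?_⟩
    · rw [hkeys]
      exact (PySem.Set.mem_ofList _ _).mpr (List.mem_map.mpr ⟨p, hp, rfl⟩)
    · rw [Ne, Bool.not_eq_true, hget, List.any_eq_false]
      intro q hq
      by_cases hk : pvKey board q = pvKey board p
      · simp [(not_ok_iff board q).mpr (hall q hq hk)]
      · simp [beq_eq_false_iff_ne.mpr hk]

def pvInvalid (board : List (List (List (String × String)))) : Prop :=
  (∃ i < board.length, ∀ j < board.length, pvInelig board (i, j)) ∨
  (∃ j < board.length, ∀ i < board.length, pvInelig board (i, j)) ∨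
  (∃ p ∈ pvNP board.length, ∀ q ∈ pvNP board.length,
      pvKey board q = pvKey board p → pvInelig board q)


-- ---- B-side: unrolling the early-exit row loop ----

def pvColStepRow (c : List Bool) (row : List (List (String × String))) : List Bool :=
  (PySem.List.enumerate row).foldl
    (fun c jc => if (pvCellState jc.2 != "ineligible") then c.set jc.1.toNat true else c) c

def pvColorStepRow (k : PySem.Dict String Bool) (row : List (List (String × String))) :
    PySem.Dict String Bool :=
  (PySem.List.enumerate row).foldl
    (fun k jc => k.insert (pvCellColor jc.2)
      (k.getD (pvCellColor jc.2) false || (pvCellState jc.2 != "ineligible"))) k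

def pvBadRowB (row : List (List (String × String))) : Bool :=
  row.all (fun cell => pvCellState cell == "ineligible")

theorem foldl_or_any {α : Type} (l : List α) (p : α → Bool) (b : Bool) :
    l.foldl (fun r a => r || p a) b = (b || l.any p) := by
  induction l generalizing b with
  | nil => simp
  | cons x l ih => simp [ih, Bool.or_assoc]

theorem rowstep_split (row : List (List (String × String))) (b : Bool) (c : List Bool)
    (k : PySem.Dict String Bool) :
    (PySem.List.enumerate row).foldl pvAltRowStep (b, c, k)
      = (b || !pvBadRowB row, pvColStepRow c row, pvColorStepRow k row) := by
  unfold pvAltRowStep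
  rw [PySem.List.foldl_prod_mk
    (f := fun (r : Bool) (jc : Int × List (String × String)) => r || (pvCellState jc.2 != "ineligible"))
    (g := fun (t : List Bool × PySem.Dict String Bool) (jc : Int × List (String × String)) =>
      ((if (pvCellState jc.2 != "ineligible") then t.1.set jc.1.toNat true else t.1),
       t.2.insert (pvCellColor jc.2)
         (t.2.getD (pvCellColor jc.2) false || (pvCellState jc.2 != "ineligible"))))]
  rw [PySem.List.foldl_prod_mk
    (f := fun (c : List Bool) (jc : Int × List (String × String)) =>
      if (pvCellState jc.2 != "ineligible") then c.set jc.1.toNat true else c)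
    (g := fun (k : PySem.Dict String Bool) (jc : Int × List (String × String)) =>
      k.insert (pvCellColor jc.2)
        (k.getD (pvCellColor jc.2) false || (pvCellState jc.2 != "ineligible")))]
  have h1 : (PySem.List.enumerate row).foldl
      (fun r jc => r || (pvCellState jc.2 != "ineligible")) b = (b || !pvBadRowB row) := by
    rw [foldl_or_any]
    congr 1
    rw [show (fun (jc : Int × List (String × String)) => pvCellState jc.2 != "ineligible")
          = ((fun cell => pvCellState cell != "ineligible") ∘ (fun (jc : Int × List (String × String)) => jc.2)) from rfl]
    rw [← List.any_map, PySem.List.map_snd_enumerate]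
    simp [pvBadRowB, List.all_eq_not_any_not, bne]
  rw [h1]
  unfold pvColStepRow pvColorStepRow
  rfl

theorem loop_eq (rows : List (List (List (String × String)))) :
    ∀ (c : List Bool) (k : PySem.Dict String Bool),
    pvAltLoop rows c k
      = (rows.any pvBadRowB ||
          (!(rows.foldl pvColStepRow c).all id ||
            !((rows.foldl pvColorStepRow k).values.all id))) := by
  induction rows with
  | nil => intro c k; simp [pvAltLoop]
  | cons r rest ih =>
    intro c k
    show (let s := (PySem.List.enumerate r).foldl pvAltRowStep (false, c, k)
          if !s.1 then true else pvAltLoop rest s.2.1 s.2.2) = _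
    rw [rowstep_split]
    by_cases hb : pvBadRowB r = true
    · simp [hb]
    · simp only [Bool.not_eq_true] at hb
      simp [hb, ih]

-- ---- B-side: the accumulated column / color trackers equal the flat cell folds ----

theorem map_range_getD {α : Type} (l : List α) (d : α) :
    (List.range l.length).map (fun i => l.getD i d) = l := by
  apply List.ext_getElem
  · simp
  · intro i h1 h2
    simp only [List.getElem_map, List.getElem_range]
    exact List.getD_eq_getElem l d h2

theorem foldl_rows_eq {σ : Type} (board : List (List (List (String × String))))
    (f : σ → List (List (String × String)) → σ) (init : σ) :
    board.foldl f init
      = (List.range board.length).foldl (fun a i => f a (board.getD i [])) init := by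
  conv_lhs => rw [← map_range_getD board []]
  rw [List.foldl_map]

theorem foldl_nested_range {σ : Type} (n : Nat) (F : σ → Nat → Nat → σ) (s : σ) :
    (List.range n).foldl (fun a i => (List.range n).foldl (fun a' j => F a' i j) a) s
      = (pvNP n).foldl (fun a p => F a p.1 p.2) s := by
  simp only [pvNP, List.foldl_flatMap, List.foldl_map]

theorem colStepRow_eq (c : List Bool) (row : List (List (String × String))) :
    pvColStepRow c row
      = (List.range row.length).foldl
          (fun c j => if (pvCellState (row.getD j []) != "ineligible") then c.set j true else c) c := by
  unfold pvColStepRow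
  rw [PySem.List.enumerate_eq_map_pyRange row [], List.foldl_map]
  rw [show PySem.List.len row = (row.length : Int) from rfl]
  rw [PySem.List.pyRange_zero_natCast, List.foldl_map]
  simp [PySem.List.pyGetD_natCast]

theorem colorStepRow_eq (k : PySem.Dict String Bool) (row : List (List (String × String))) :
    pvColorStepRow k row
      = (List.range row.length).foldl
          (fun k j => k.insert (pvCellColor (row.getD j []))
            (k.getD (pvCellColor (row.getD j [])) false ||
              (pvCellState (row.getD j []) != "ineligible"))) k := by
  unfold pvColorStepRow
  rw [PySem.List.enumerate_eq_map_pyRange row [], List.foldl_map]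
  rw [show PySem.List.len row = (row.length : Int) from rfl]
  rw [PySem.List.pyRange_zero_natCast, List.foldl_map]
  simp [PySem.List.pyGetD_natCast]

theorem rowlen_eq (board : List (List (List (String × String))))
    (hsq : ∀ row ∈ board, row.length = board.length) (i : Nat) (hi : i < board.length) :
    (board.getD i []).length = board.length := by
  rw [List.getD_eq_getElem board [] hi]
  exact hsq board[i] (List.getElem_mem hi)

theorem colTracker_eq (board : List (List (List (String × String))))
    (hsq : ∀ row ∈ board, row.length = board.length) :
    board.foldl pvColStepRow (List.replicate board.length false) = pvColFold board := by
  rw [foldl_rows_eq]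
  have hmid := PySem.List.foldl_congr_mem
    (l := List.range board.length) (init := (List.replicate board.length false : List Bool))
    (f := fun a i => pvColStepRow a (board.getD i []))
    (g := fun a i => (List.range board.length).foldl
      (fun c j => if (pvCellState ((board.getD i []).getD j []) != "ineligible") then c.set j true else c) a)
    (by
      intro a i hi
      show pvColStepRow a (board.getD i []) = _
      rw [colStepRow_eq, rowlen_eq board hsq i (List.mem_range.mp hi)])
  rw [hmid, foldl_nested_range]
  unfold pvColFold
  simp only [pvOk, pvCellN, pvAt, PySem.List.pyGetD_natCast]

theorem colorTracker_eq (board : List (List (List (String × String))))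
    (hsq : ∀ row ∈ board, row.length = board.length) :
    board.foldl pvColorStepRow ⟨[]⟩ = pvColorFold board := by
  rw [foldl_rows_eq]
  have hmid := PySem.List.foldl_congr_mem
    (l := List.range board.length) (init := (⟨[]⟩ : PySem.Dict String Bool))
    (f := fun a i => pvColorStepRow a (board.getD i []))
    (g := fun a i => (List.range board.length).foldl
      (fun k j => k.insert (pvCellColor ((board.getD i []).getD j []))
        (k.getD (pvCellColor ((board.getD i []).getD j [])) false ||
          (pvCellState ((board.getD i []).getD j []) != "ineligible"))) a)
    (by
      intro a i hi
      show pvColorStepRow a (board.getD i []) = _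
      rw [colorStepRow_eq, rowlen_eq board hsq i (List.mem_range.mp hi)])
  rw [hmid, foldl_nested_range]
  unfold pvColorFold
  simp only [pvOk, pvKey, pvCellN, pvAt, PySem.List.pyGetD_natCast]

theorem anyBad_iff (board : List (List (List (String × String))))
    (hsq : ∀ row ∈ board, row.length = board.length) :
    board.any pvBadRowB = true ↔
      ∃ i < board.length, ∀ j < board.length, pvInelig board (i, j) := by
  rw [List.any_eq_true]
  constructor
  · rintro ⟨row, hrow, hb⟩
    obtain ⟨i, hi, rfl⟩ := List.mem_iff_getElem.mp hrow
    refine ⟨i, hi, fun j hj => ?_⟩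
    have hj' : j < board[i].length := by rw [hsq board[i] (List.getElem_mem hi)]; exact hj
    have := List.all_eq_true.mp hb board[i][j] (List.getElem_mem hj')
    unfold pvInelig pvCellN pvAt
    rw [PySem.List.pyGetD_natCast, PySem.List.pyGetD_natCast,
      List.getD_eq_getElem board [] hi, List.getD_eq_getElem board[i] [] hj']
    exact beq_iff_eq.mp this
  · rintro ⟨i, hi, hall⟩
    refine ⟨board[i], List.getElem_mem hi, ?_⟩
    unfold pvBadRowB
    rw [List.all_eq_true, List.forall_mem_iff_forall_getElem]
    intro j hj
    have hj' : j < board.length := by rw [← hsq board[i] (List.getElem_mem hi)]; exact hj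
    have := hall j hj'
    unfold pvInelig pvCellN pvAt at this
    rw [PySem.List.pyGetD_natCast, PySem.List.pyGetD_natCast,
      List.getD_eq_getElem board [] hi, List.getD_eq_getElem board[i] [] hj] at this
    exact beq_iff_eq.mpr this

theorem B_iff (board : List (List (List (String × String))))
    (hsq : ∀ row ∈ board, row.length = board.length) :
    inv_board_chk_alt board = true ↔ pvInvalid board := by
  unfold inv_board_chk_alt
  rw [loop_eq]
  simp only [Bool.or_eq_true, Bool.not_eq_true']
  rw [colTracker_eq board hsq, colorTracker_eq board hsq]
  rw [anyBad_iff board hsq, colFold_false_iff, colorFold_false_iff]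
  unfold pvInvalid
  rfl
def pvRowChk (board : List (List (List (String × String)))) : Bool :=
  (PySem.List.pyRange 0 (board.length : Int)).any (fun i =>
    (PySem.List.pyGetD board i []).all (fun cell => pvCellState cell == "ineligible"))

def pvColChk (board : List (List (List (String × String)))) : Bool :=
  (PySem.List.pyRange 0 (board.length : Int)).any (fun j =>
    (PySem.List.pyRange 0 (board.length : Int)).all (fun i =>
      pvCellState (pvAt board i j) == "ineligible"))

def pvRegionDict (board : List (List (List (String × String)))) : PySem.Dict String (List (Int × Int)) :=
  (PySem.List.pyRange 0 (board.length : Int)).foldl (fun d i =>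
    (PySem.List.pyRange 0 (board.length : Int)).foldl (fun d j =>
      PySem.Dict.modify d (pvCellColor (pvAt board i j)) [] (fun l => l ++ [(i, j)])) d) ⟨[]⟩

def pvRegionChk (board : List (List (List (String × String)))) : Bool :=
  (pvRegionDict board).items.any (fun kv =>
    !(kv.2.any (fun rc => pvCellState (pvAt board rc.1 rc.2) == "queen")) &&
    kv.2.all (fun rc => pvCellState (pvAt board rc.1 rc.2) == "ineligible"))

theorem A_eq (board : List (List (List (String × String)))) :
    inv_board_chk board = (pvRowChk board || pvColChk board || pvRegionChk board) := by
  have g : ∀ a b c : Bool, (if a = true then true else if b = true then true else c) = (a || b || c) := by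
    decide
  simp only [inv_board_chk, pvRowChk, pvColChk, pvRegionChk, pvRegionDict]
  exact g _ _ _

theorem rowChk_iff (board : List (List (List (String × String))))
    (hpre : ∀ row ∈ board, row.length = board.length) :
    pvRowChk board = true ↔ ∃ i < board.length, ∀ j < board.length, pvInelig board (i, j) := by
  unfold pvRowChk
  rw [PySem.List.pyRange_zero_natCast, List.any_map]
  simp only [List.any_eq_true, List.mem_range, Function.comp]
  constructor
  · rintro ⟨i, hi, hall⟩
    refine ⟨i, hi, fun j hj => ?_⟩
    rw [PySem.List.pyGetD_natCast, List.getD_eq_getElem board [] hi] at hall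
    have hrow := hpre board[i] (List.getElem_mem hi)
    have hj' : j < board[i].length := by rw [hrow]; exact hj
    have := List.all_eq_true.mp hall board[i][j] (List.getElem_mem hj')
    unfold pvInelig pvCellN pvAt
    rw [PySem.List.pyGetD_natCast, PySem.List.pyGetD_natCast,
      List.getD_eq_getElem board [] hi, List.getD_eq_getElem board[i] [] hj']
    exact beq_iff_eq.mp this
  · rintro ⟨i, hi, hall⟩
    refine ⟨i, hi, ?_⟩
    rw [PySem.List.pyGetD_natCast, List.getD_eq_getElem board [] hi]
    rw [List.all_eq_true]
    rw [List.forall_mem_iff_forall_getElem]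
    intro j hj
    have hrow := hpre board[i] (List.getElem_mem hi)
    have hj' : j < board.length := by rw [← hrow]; exact hj
    have := hall j hj'
    unfold pvInelig pvCellN pvAt at this
    rw [PySem.List.pyGetD_natCast, PySem.List.pyGetD_natCast,
      List.getD_eq_getElem board [] hi, List.getD_eq_getElem board[i] [] hj] at this
    exact beq_iff_eq.mpr this

theorem colChk_iff (board : List (List (List (String × String)))) :
    pvColChk board = true ↔ ∃ j < board.length, ∀ i < board.length, pvInelig board (i, j) := by
  unfold pvColChk
  rw [PySem.List.pyRange_zero_natCast, List.any_map]
  simp only [List.any_eq_true, List.mem_range, Function.comp, List.all_map, List.all_eq_true]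
  constructor
  · rintro ⟨j, hj, hall⟩
    refine ⟨j, hj, fun i hi => ?_⟩
    have := hall i hi
    exact beq_iff_eq.mp this
  · rintro ⟨j, hj, hall⟩
    refine ⟨j, hj, fun i hi => ?_⟩
    exact beq_iff_eq.mpr (hall i hi)

theorem regionDict_eq (board : List (List (List (String × String)))) :
    pvRegionDict board
      = ((pvNP board.length).map (fun p => (pvKey board p, ((p.1 : Int), (p.2 : Int))))).foldl
          (fun d pr => d.modify pr.1 [] (fun l => l ++ [pr.2])) ⟨[]⟩ := by
  unfold pvRegionDict
  rw [foldl_nested_pyRange (σ := PySem.Dict String (List (Int × Int))) board.length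
    (fun d i j => PySem.Dict.modify d (pvCellColor (pvAt board i j)) [] (fun l => l ++ [(i, j)]))]
  rw [List.foldl_map]
  rfl

theorem regionChk_iff (board : List (List (List (String × String)))) :
    pvRegionChk board = true ↔
      ∃ p ∈ pvNP board.length, ∀ q ∈ pvNP board.length,
        pvKey board q = pvKey board p → pvInelig board q := by
  have hnodup : (pvRegionDict board).keys.Nodup := by
    rw [regionDict_eq]
    exact PySem.Dict.nodup_keys_foldl_modify_key _ Prod.fst _ _ _ (by simp)
  have hget : ∀ c, (pvRegionDict board).getD c []
      = ((pvNP board.length).filter (fun p => pvKey board p == c)).map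
          (fun p => ((p.1 : Int), (p.2 : Int))) := by
    intro c
    rw [regionDict_eq, PySem.Dict.getD_foldl_modify_append]
    rw [show (⟨[]⟩ : PySem.Dict String (List (Int × Int))).getD c [] = [] from rfl]
    rw [List.filter_map, List.map_map]
    rfl
  have hkeys : (pvRegionDict board).keys
      = PySem.Set.ofList ((pvNP board.length).map (pvKey board)) := by
    rw [regionDict_eq, PySem.Dict.keys_foldl_modify_key, List.map_map]
    rfl
  unfold pvRegionChk
  rw [PySem.Dict.items_eq_map_keys _ hnodup [], List.any_map]
  simp only [List.any_eq_true, Function.comp]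
  constructor
  · rintro ⟨c, hc, hq⟩
    rw [hkeys] at hc
    obtain ⟨p, hp, rfl⟩ := List.mem_map.mp ((PySem.Set.mem_ofList _ _).mp hc)
    simp only [Bool.and_eq_true, Bool.not_eq_true', List.any_eq_false, List.all_eq_true] at hq
    obtain ⟨-, hall⟩ := hq
    refine ⟨p, hp, fun q hqmem hkey => ?_⟩
    have hmem : ((q.1 : Int), (q.2 : Int)) ∈ (pvRegionDict board).getD (pvKey board p) [] := by
      rw [hget]
      exact List.mem_map.mpr ⟨q, List.mem_filter.mpr ⟨hqmem, beq_iff_eq.mpr hkey⟩, rfl⟩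
    have := hall _ hmem
    exact beq_iff_eq.mp this
  · rintro ⟨p, hp, hall⟩
    refine ⟨pvKey board p, ?_, ?_⟩
    · rw [hkeys]
      exact (PySem.Set.mem_ofList _ _).mpr (List.mem_map.mpr ⟨p, hp, rfl⟩)
    · simp only [Bool.and_eq_true, Bool.not_eq_true', List.any_eq_false, List.all_eq_true]
      constructor
      · intro rc hrc
        rw [hget] at hrc
        obtain ⟨q, hqf, rfl⟩ := List.mem_map.mp hrc
        obtain ⟨hqmem, hqkey⟩ := List.mem_filter.mp hqf
        have hin := hall q hqmem (beq_iff_eq.mp hqkey)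
        unfold pvInelig pvCellN at hin
        simp only [beq_iff_eq]
        intro hqueen
        have hq2 : pvCellState (pvAt board (q.1 : Int) (q.2 : Int)) = "queen" := by
          simpa using hqueen
        rw [hin] at hq2
        exact absurd hq2 (by decide)
      · intro rc hrc
        rw [hget] at hrc
        obtain ⟨q, hqf, rfl⟩ := List.mem_map.mp hrc
        obtain ⟨hqmem, hqkey⟩ := List.mem_filter.mp hqf
        have hin := hall q hqmem (beq_iff_eq.mp hqkey)
        unfold pvInelig pvCellN at hin
        simp only [beq_iff_eq]
        simpa using hin

theorem A_iff (board : List (List (List (String × String))))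
    (hpre : ∀ row ∈ board, row.length = board.length) :
    inv_board_chk board = true ↔ pvInvalid board := by
  rw [A_eq]
  simp only [Bool.or_eq_true]
  rw [rowChk_iff board hpre, colChk_iff, regionChk_iff]
  unfold pvInvalid
  rw [or_assoc]

-- ===== VERDICT (by name: the statement is the Claim_ definition above) =====

theorem A_true_of_bad (board : List (List (List (String × String))))
    (h : ∃ i < board.length, pvBadRow (board.getD i []) ∧
      ∀ m < i, pvGoodRow (board.getD m []) board.length) :
    inv_board_chk board = true := by
  obtain ⟨i, hi, hbad, -⟩ := h
  rw [A_eq]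
  suffices hr : pvRowChk board = true by simp [hr]
  unfold pvRowChk
  rw [PySem.List.pyRange_zero_natCast, List.any_map]
  simp only [List.any_eq_true, List.mem_range, Function.comp]
  refine ⟨i, hi, ?_⟩
  rw [PySem.List.pyGetD_natCast, List.all_eq_true]
  intro cell hc
  have hst := (hbad cell hc).1
  show (pvCellState cell == "ineligible") = true
  unfold pvCellState
  rw [PySem.Dict.getD_eq_get?_getD, hst]
  rfl

theorem B_true_of_bad (board : List (List (List (String × String))))
    (h : ∃ i < board.length, pvBadRow (board.getD i []) ∧
      ∀ m < i, pvGoodRow (board.getD m []) board.length) :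
    inv_board_chk_alt board = true := by
  obtain ⟨i, hi, hbad, -⟩ := h
  unfold inv_board_chk_alt
  rw [loop_eq]
  suffices hr : board.any pvBadRowB = true by simp [hr]
  rw [List.any_eq_true]
  refine ⟨board.getD i [], ?_, ?_⟩
  · rw [List.getD_eq_getElem board [] hi]
    exact List.getElem_mem hi
  · unfold pvBadRowB
    rw [List.all_eq_true]
    intro cell hc
    have hst := (hbad cell hc).1
    show (pvCellState cell == "ineligible") = true
    unfold pvCellState
    rw [PySem.Dict.getD_eq_get?_getD, hst]
    rfl

-- ===== VERDICT (by name: the statement is the Claim_ definition above) =====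
theorem inv_board_chk_spec : Claim_equal_inv_board_chk := by
  intro board _ hpre
  unfold Spec_inv_board_chk
  rcases hpre with hsq | hbad
  · have hlen : ∀ row ∈ board, row.length = board.length := fun row hr => (hsq row hr).1
    rw [Bool.eq_iff_iff, A_iff board hlen, B_iff board hlen]
  · rw [A_true_of_bad board hbad, B_true_of_bad board hbad]
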